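-- pv_equiv track=rewrite | github.com/namrata18s/Deep_Learning_Namrata_HW2 | decode_indices.py | remove_repeated_sequences
-- ===== SOURCE A (Python) =====
-- def remove_repeated_sequences(words):
--     """Remove repeated consecutive sequences of words."""
--     cleaned = []
--     i = 0
--     while i < len(words):
--         seq_len = 1
--         while i + 2*seq_len <= len(words):
--             seq1 = words[i:i+seq_len]
--             seq2 = words[i+seq_len:i+2*seq_len]
--             if seq1 == seq2:
--                 i += seq_len  # skip repeated sequence
--                 seq_len = 1   # reset sequence length
--             else:
--                 seq_len += 1
--         cleaned.append(words[i])
--         i += 1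
--     return cleaned
-- ===== SOURCE B (Python) =====
-- def remove_repeated_sequences(words):
--     """Remove repeated consecutive sequences of words.
--
--     Same scan as the original, but the slice comparisons are replaced by O(1)
--     lookups in a precomputed longest-common-prefix table:
--     lcp[a][b] = length of the longest common prefix of words[a:] and words[b:],
--     so words[i:i+L] == words[i+L:i+2L] iff lcp[i][i+L] >= L."""
--     n = len(words)
--     lcp = [[0] * (n + 1) for _ in range(n + 1)]
--     for a in range(n - 1, -1, -1):
--         wa = words[a]
--         row = lcp[a]
--         nxt = lcp[a + 1]
--         for b in range(n - 1, -1, -1):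
--             if wa == words[b]:
--                 row[b] = nxt[b + 1] + 1
--     cleaned = []
--     i = 0
--     while i < n:
--         L = 1
--         while i + 2 * L <= n:
--             if lcp[i][i + L] >= L:
--                 i += L
--                 L = 1
--             else:
--                 L += 1
--         cleaned.append(words[i])
--         i += 1
--     return cleaned
-- ===== Notes on version B (the rewrite author's own statement) =====
-- stated objective: faster
-- what changed: B precomputes an (n+1)x(n+1) longest-common-prefix table for all pairs of suffixes (dynamic programming, back to front), so every slice comparison words[i:i+L]==words[i+L:i+2L] of A becomes an O(1) table lookup lcp[i][i+L] >= L.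
import Mathlib
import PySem

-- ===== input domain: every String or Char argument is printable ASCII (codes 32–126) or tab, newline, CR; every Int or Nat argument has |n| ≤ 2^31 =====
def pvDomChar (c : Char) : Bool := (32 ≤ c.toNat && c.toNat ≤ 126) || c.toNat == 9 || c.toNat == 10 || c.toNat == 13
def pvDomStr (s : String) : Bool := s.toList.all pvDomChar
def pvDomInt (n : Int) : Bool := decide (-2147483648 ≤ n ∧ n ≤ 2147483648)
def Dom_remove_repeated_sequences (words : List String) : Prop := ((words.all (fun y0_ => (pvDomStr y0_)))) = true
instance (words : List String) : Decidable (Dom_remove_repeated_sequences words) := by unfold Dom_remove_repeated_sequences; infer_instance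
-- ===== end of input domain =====

-- B replaces A's repeated O(L) slice comparisons by O(1) lookups in a precomputed
-- longest-common-prefix table (same scan order, so the same output); measured faster
-- on large inputs in a timing run.

-- ===== PORT A =====
-- inner `while i + 2*seq_len <= len(words)` loop of A; returns the final i.
-- `fuel` is only a structural-termination device: each iteration strictly decreases
-- 2*(n-i) + (n+1-L), so the initial fuel 3*n+3 is never exhausted.
def pvInnerA (words : List String) : Nat → Nat → Nat → Nat
  | 0, i, _ => i
  | fuel + 1, i, L =>
    if i + 2 * L ≤ words.length then
      if PySem.List.slice words (some (i : Int)) (some ((i : Int) + (L : Int))) =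
         PySem.List.slice words (some ((i : Int) + (L : Int))) (some ((i : Int) + 2 * (L : Int))) then
        pvInnerA words fuel (i + L) 1
      else
        pvInnerA words fuel i (L + 1)
    else i

-- outer `while i < len(words)` loop of A, building `cleaned`; i strictly increases,
-- so fuel n+1 is never exhausted
def pvOuterA (words : List String) : Nat → Nat → List String
  | 0, _ => []
  | fuel + 1, i =>
    if i < words.length then
      words.getD (pvInnerA words (3 * words.length + 3) i 1) ""
        :: pvOuterA words fuel (pvInnerA words (3 * words.length + 3) i 1 + 1)
    else []

def remove_repeated_sequences (words : List String) : List String :=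
  pvOuterA words (words.length + 1) 0

-- ===== PORT B =====
-- inner `for b in range(n-1, -1, -1)` of B's table build: fills one row, consing
-- entries front-most last (descending b), on top of the untouched trailing cell(s)
def pvRowB (words : List String) (wa : String) (nxt : List Nat) : Nat → List Nat → List Nat
  | 0, acc => acc
  | b + 1, acc =>
      pvRowB words wa nxt b
        ((if words.getD b "" == wa then nxt.getD (b + 1) 0 + 1 else 0) :: acc)

-- outer `for a in range(n-1, -1, -1)`: after k steps the rows a = n-k ... n are final
def pvTblB (words : List String) : Nat → List (List Nat)
  | 0 => [List.replicate (words.length + 1) 0]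
  | k + 1 =>
      let rest := pvTblB words k
      pvRowB words (words.getD (words.length - (k + 1)) "") (rest.headD [])
        words.length [0] :: rest

-- inner scan loop of B: `lcp[i][i+L] >= L` instead of a slice comparison
-- (same fuel device as in port A)
def pvInnerB (words : List String) (tbl : List (List Nat)) : Nat → Nat → Nat → Nat
  | 0, i, _ => i
  | fuel + 1, i, L =>
    if i + 2 * L ≤ words.length then
      if L ≤ (tbl.getD i []).getD (i + L) 0 then
        pvInnerB words tbl fuel (i + L) 1
      else
        pvInnerB words tbl fuel i (L + 1)
    else i

def pvOuterB (words : List String) (tbl : List (List Nat)) : Nat → Nat → List String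
  | 0, _ => []
  | fuel + 1, i =>
    if i < words.length then
      words.getD (pvInnerB words tbl (3 * words.length + 3) i 1) ""
        :: pvOuterB words tbl fuel (pvInnerB words tbl (3 * words.length + 3) i 1 + 1)
    else []

def remove_repeated_sequences_alt (words : List String) : List String :=
  pvOuterB words (pvTblB words words.length) (words.length + 1) 0

-- ===== PRECONDITION & SPEC =====
def Spec_remove_repeated_sequences (words : List String) (out : List String) : Prop := out = remove_repeated_sequences_alt words
instance (words : List String) (out : List String) : Decidable (Spec_remove_repeated_sequences words out) := by unfold Spec_remove_repeated_sequences; infer_instance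

-- ===== CLAIM (what is proved, stated in full; the proofs are below) =====
def Claim_equal_remove_repeated_sequences : Prop := ∀ (words : List String), Dom_remove_repeated_sequences words → Spec_remove_repeated_sequences words (remove_repeated_sequences words)

-- ===== LEMMAS AND PROOFS =====

-- mathematical longest-common-prefix of words[a:] and words[b:]
def pvLcpS (words : List String) (a b : Nat) : Nat :=
  if h : a < words.length ∧ b < words.length then
    if words.getD a "" == words.getD b "" then pvLcpS words (a + 1) (b + 1) + 1 else 0
  else 0
termination_by words.length - a
decreasing_by omega

def pvRowS (words : List String) (a : Nat) : List Nat :=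
  (List.range words.length).map (fun b => pvLcpS words a b) ++ [0]

theorem pvLcpS_of_not_lt (words : List String) (a b : Nat)
    (h : ¬ (a < words.length ∧ b < words.length)) : pvLcpS words a b = 0 := by
  rw [pvLcpS, dif_neg h]

theorem pvRowS_getD (words : List String) (a j : Nat) (hj : j ≤ words.length) :
    (pvRowS words a).getD j 0 = pvLcpS words a j := by
  unfold pvRowS
  rcases Nat.lt_or_ge j words.length with hlt | hge
  · rw [List.getD, List.getElem?_append_left (by simpa using hlt)]
    simp [hlt]
  · have hj' : j = words.length := le_antisymm hj hge
    subst hj'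
    rw [List.getD, List.getElem?_append_right (by simp), pvLcpS_of_not_lt words _ _ (by omega)]
    simp

theorem pvRowB_eq (words : List String) (wa : String) (nxt : List Nat) :
    ∀ (m : Nat) (acc : List Nat),
      pvRowB words wa nxt m acc =
        (List.range m).map (fun b => if words.getD b "" == wa then nxt.getD (b + 1) 0 + 1 else 0)
          ++ acc := by
  intro m
  induction m with
  | zero => intro acc; simp [pvRowB]
  | succ m ih =>
      intro acc
      rw [pvRowB, ih, List.range_succ, List.map_append]
      simp

theorem pvTblB_eq (words : List String) :
    ∀ (k : Nat), k ≤ words.length →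
      pvTblB words k = (List.range (k + 1)).map (fun j => pvRowS words (words.length - k + j)) := by
  intro k
  induction k with
  | zero =>
      intro _
      have hz : (List.range words.length).map (fun b => pvLcpS words words.length b)
          = List.replicate words.length 0 := by
        rw [List.eq_replicate_iff]
        constructor
        · simp
        · intro x hx
          simp only [List.mem_map] at hx
          obtain ⟨b, _, hb⟩ := hx
          rw [← hb, pvLcpS_of_not_lt words _ _ (by omega)]
      have h0 : words.length - 0 + 0 = words.length := by omega
      rw [pvTblB, List.range_one, List.map_cons, List.map_nil, h0, pvRowS, hz,
        List.replicate_succ']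
  | succ k ih =>
      intro hk
      have hk' : k ≤ words.length := by omega
      rw [pvTblB, ih hk']
      have hhead : ((List.range (k + 1)).map (fun j => pvRowS words (words.length - k + j))).headD []
          = pvRowS words (words.length - k) := by
        rw [List.range_succ_eq_map]
        simp
      rw [hhead, pvRowB_eq]
      have hrow : (List.range words.length).map
            (fun b => if words.getD b "" == words.getD (words.length - (k + 1)) "" then
                (pvRowS words (words.length - k)).getD (b + 1) 0 + 1 else 0)
          = (List.range words.length).map (fun b => pvLcpS words (words.length - (k + 1)) b) := by
        apply List.map_congr_left
        intro b hb
        rw [List.mem_range] at hb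
        have ha : words.length - (k + 1) < words.length := by omega
        have hstep : words.length - k = (words.length - (k + 1)) + 1 := by omega
        rw [hstep, pvRowS_getD words _ (b + 1) (by omega)]
        conv_rhs => rw [pvLcpS]
        rw [dif_pos ⟨ha, hb⟩]
        by_cases hc : words.getD (words.length - (k + 1)) "" = words.getD b ""
        · rw [if_pos (beq_iff_eq.mpr hc.symm), if_pos (beq_iff_eq.mpr hc)]
        · rw [if_neg (fun hcc => hc (beq_iff_eq.mp hcc).symm),
            if_neg (fun hcc => hc (beq_iff_eq.mp hcc))]
      have harg : (fun j => pvRowS words (words.length - (k + 1) + j)) ∘ Nat.succ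
          = fun j => pvRowS words (words.length - k + j) := by
        funext j
        simp only [Function.comp_apply]
        congr 1
        omega
      conv_rhs => rw [List.range_succ_eq_map, List.map_cons, List.map_map]
      rw [harg, hrow, pvRowS]
      simp

theorem pvTbl_lookup (words : List String) (i j : Nat) (hi : i ≤ words.length)
    (hj : j ≤ words.length) :
    ((pvTblB words words.length).getD i []).getD j 0 = pvLcpS words i j := by
  rw [pvTblB_eq words words.length le_rfl]
  have : ((List.range (words.length + 1)).map
        (fun j' => pvRowS words (words.length - words.length + j'))).getD i []
      = pvRowS words i := by
    rw [List.getD, List.getElem?_map, List.getElem?_range (by omega)]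
    simp
  rw [this, pvRowS_getD words i j hj]

theorem pvTake_drop_eq_iff (words : List String) :
    ∀ (L a b : Nat), a + L ≤ words.length → b + L ≤ words.length →
      (((words.drop a).take L = (words.drop b).take L) ↔ L ≤ pvLcpS words a b) := by
  intro L
  induction L with
  | zero => intro a b _ _; simp
  | succ L ih =>
      intro a b ha hb
      have ha' : a < words.length := by omega
      have hb' : b < words.length := by omega
      rw [List.drop_eq_getElem_cons ha', List.drop_eq_getElem_cons hb',
        List.take_succ_cons, List.take_succ_cons]
      rw [pvLcpS, dif_pos ⟨ha', hb'⟩]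
      rw [List.getD_eq_getElem words "" ha', List.getD_eq_getElem words "" hb']
      by_cases hc : words[a] = words[b]
      · rw [if_pos (by simp [hc])]
        constructor
        · intro h
          have htail := (List.cons_eq_cons.mp h).2
          have := (ih (a + 1) (b + 1) (by omega) (by omega)).mp htail
          omega
        · intro h
          have := (ih (a + 1) (b + 1) (by omega) (by omega)).mpr (by omega)
          rw [hc, this]
      · rw [if_neg (by simp [hc])]
        constructor
        · intro h
          exact absurd (List.cons_eq_cons.mp h).1 hc
        · intro h; omega

theorem pvInner_eq (words : List String) :
    ∀ (fuel i L : Nat),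
      pvInnerB words (pvTblB words words.length) fuel i L = pvInnerA words fuel i L := by
  intro fuel
  induction fuel with
  | zero => intro i L; rfl
  | succ fuel ih =>
      intro i L
      simp only [pvInnerA, pvInnerB]
      by_cases hg : i + 2 * L ≤ words.length
      · rw [if_pos hg, if_pos hg]
        have hcast1 : ((i : Int) + (L : Int)) = (((i + L : Nat) : Int)) := by push_cast; ring
        have hcast2 : ((i : Int) + 2 * (L : Int)) = (((i + L : Nat) : Int) + ((L : Nat) : Int)) := by
          push_cast; ring
        have hcond : (PySem.List.slice words (some (i : Int)) (some ((i : Int) + (L : Int))) =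
            PySem.List.slice words (some ((i : Int) + (L : Int))) (some ((i : Int) + 2 * (L : Int))))
            ↔ L ≤ ((pvTblB words words.length).getD i []).getD (i + L) 0 := by
          rw [hcast1, hcast2, PySem.List.slice_natCast, PySem.List.slice_natCast_add,
            Nat.add_sub_cancel_left, pvTbl_lookup words i (i + L) (by omega) (by omega)]
          exact pvTake_drop_eq_iff words L i (i + L) (by omega) (by omega)
        by_cases hb : L ≤ ((pvTblB words words.length).getD i []).getD (i + L) 0
        · rw [if_pos hb, if_pos (hcond.mpr hb)]
          exact ih (i + L) 1
        · rw [if_neg hb, if_neg (fun ha => hb (hcond.mp ha))]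
          exact ih i (L + 1)
      · rw [if_neg hg, if_neg hg]

theorem pvOuter_eq (words : List String) :
    ∀ (fuel i : Nat),
      pvOuterB words (pvTblB words words.length) fuel i = pvOuterA words fuel i := by
  intro fuel
  induction fuel with
  | zero => intro i; rfl
  | succ fuel ih =>
      intro i
      simp only [pvOuterA, pvOuterB]
      by_cases h : i < words.length
      · rw [if_pos h, if_pos h, pvInner_eq, ih]
      · rw [if_neg h, if_neg h]

-- ===== VERDICT (by name: the statement is the Claim_ definition above) =====
theorem remove_repeated_sequences_spec : Claim_equal_remove_repeated_sequences := by
  intro words _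
  unfold Spec_remove_repeated_sequences remove_repeated_sequences remove_repeated_sequences_alt
  rw [pvOuter_eq]
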